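-- pv_equiv track=rewrite | github.com/Eason51/chemical-metrics | backend.py | compoundName
-- ===== SOURCE A (Python) =====
-- def compoundName(string):
--     if(string == ""):
--         return False
--     string = string.lower().strip()
--     for c in string:
--         if(c.isspace()):
--             return False
--     if(string.isdigit()):
--         return True
--     if(len(string) >= 2 and string[0].isdigit()):
--         onlyDigit = True
--         for c in string:
--             if(not onlyDigit and not c.isalpha()):
--                 return False
--             if(onlyDigit and not c.isdigit()):
--                 onlyDigit = False
--         return True
--     return False
-- ===== SOURCE B (Python) =====
-- def compoundName(string):
--     if string == "":
--         return False
--     s = string.lower().strip()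
--
--     # table-driven DFA over character classes:
--     # state 0 = start, 1 = in leading digit run, 2 = alphabetic tail
--     # (the one transition (1, 'a'|'o') -> 2 consumes the switch char unchecked);
--     # missing entries are the dead state
--     def cls(c):
--         if c.isdigit():
--             return "d"
--         if c.isalpha():
--             return "a"
--         if c.isspace():
--             return "s"
--         return "o"
--
--     table = {(0, "d"): 1, (1, "d"): 1, (1, "a"): 2, (1, "o"): 2, (2, "a"): 2}
--     state = 0
--     for c in s:
--         state = table.get((state, cls(c)), -1)
--         if state == -1:
--             return False
--     return state in (1, 2)
-- ===== Notes on version B (the rewrite author's own statement) =====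
-- stated objective: alternative
-- what changed: Replaces A's staged guards (whitespace pass, isdigit test, len/first-char guard, stateful onlyDigit loop) with a single table-driven finite automaton: each character is mapped to a class (digit/alpha/space/other) and a transition-table dict drives one state per step, accepting in states 1 (digit run) or 2 (tail after the unchecked switch char).
import Mathlib
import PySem

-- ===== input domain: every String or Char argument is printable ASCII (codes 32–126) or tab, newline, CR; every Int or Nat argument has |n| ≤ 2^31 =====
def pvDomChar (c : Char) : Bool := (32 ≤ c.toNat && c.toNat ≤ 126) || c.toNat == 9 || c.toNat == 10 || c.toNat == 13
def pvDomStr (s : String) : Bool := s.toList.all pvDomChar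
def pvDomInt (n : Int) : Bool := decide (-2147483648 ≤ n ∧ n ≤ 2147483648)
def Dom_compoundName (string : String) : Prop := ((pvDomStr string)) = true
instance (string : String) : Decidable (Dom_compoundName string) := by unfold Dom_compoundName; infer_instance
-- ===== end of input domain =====

-- B replaces A's staged guards and stateful onlyDigit loop by a single table-driven DFA
-- over character classes; same return value on every input (objective: alternative algorithm).

-- ===== PORT A =====
-- loop `for c in string: if c.isspace(): return False`
def cnSpaceLoop : List Char → Bool
  | [] => false
  | c :: cs => if PySem.Chars.isspace c then true else cnSpaceLoop cs

-- loop over chars with the `onlyDigit` flag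
def cnCheckLoop : List Char → Bool → Bool
  | [], _ => true
  | c :: cs, onlyDigit =>
    if !onlyDigit && !PySem.Chars.isalpha c then false
    else cnCheckLoop cs (if onlyDigit && !PySem.Chars.isdigit c then false else onlyDigit)

def compoundName (string : String) : Bool :=
  if string == "" then false
  else
    let s := PySem.Chars.strip (PySem.Chars.lower string.toList)
    if cnSpaceLoop s then false
    else if PySem.Chars.strIsdigit s then true
    else if 2 ≤ s.length then
      match s with
      | c :: _ => if PySem.Chars.isdigit c then cnCheckLoop s true else false
      | [] => false
    else false

-- ===== PORT B =====
-- `cls(c)`: the character's class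
def cnCls (c : Char) : String :=
  if PySem.Chars.isdigit c then "d"
  else if PySem.Chars.isalpha c then "a"
  else if PySem.Chars.isspace c then "s"
  else "o"

-- the transition table (missing entries = dead state -1)
def cnTable : PySem.Dict (Int × String) Int :=
  PySem.Dict.ofList
    [((0, "d"), 1), ((1, "d"), 1), ((1, "a"), 2), ((1, "o"), 2), ((2, "a"), 2)]

-- `for c in s: state = table.get((state, cls(c)), -1); if state == -1: return False`
-- then `return state in (1, 2)`
def cnRun : List Char → Int → Bool
  | [], state => state == 1 || state == 2
  | c :: cs, state =>
    let st := cnTable.getD (state, cnCls c) (-1)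
    if st == -1 then false else cnRun cs st

def compoundName_alt (string : String) : Bool :=
  if string == "" then false
  else
    let s := PySem.Chars.strip (PySem.Chars.lower string.toList)
    cnRun s 0

-- ===== PRECONDITION & SPEC =====
def Spec_compoundName (string : String) (out : Bool) : Prop := out = compoundName_alt string
instance (string : String) (out : Bool) : Decidable (Spec_compoundName string out) := by unfold Spec_compoundName; infer_instance

-- ===== CLAIM (what is proved, stated in full; the proofs are below) =====
def Claim_equal_compoundName : Prop := ∀ (string : String), Dom_compoundName string → Spec_compoundName string (compoundName string)

-- ===== LEMMAS AND PROOFS =====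

-- evaluating the transition table (key: a symbolic state, a literal class string)
theorem cn_beq_key (a st : Int) (x y : String) :
    ((a, x) == (st, y)) = (decide (a = st) && decide (x = y)) := by
  by_cases h : a = st <;> by_cases h2 : x = y <;>
    simp [h, h2, beq_eq_false_iff_ne, Prod.ext_iff]

theorem cnTable_s (st : Int) : cnTable.getD (st, "s") (-1) = -1 := by
  simp [cnTable, PySem.Dict.ofList, PySem.Dict.getD, PySem.Dict.get?, PySem.Dict.update,
    PySem.Dict.insert, PySem.Dict.empty, PySem.Dict.contains, List.find?, cn_beq_key]

theorem cnTable_d (st : Int) : cnTable.getD (st, "d") (-1) = if st = 0 ∨ st = 1 then 1 else -1 := by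
  rcases eq_or_ne st 0 with h0 | h0
  · subst h0; rfl
  · rcases eq_or_ne st 1 with h1 | h1
    · subst h1; rfl
    · simp [cnTable, PySem.Dict.ofList, PySem.Dict.getD, PySem.Dict.get?, PySem.Dict.update,
        PySem.Dict.insert, PySem.Dict.empty, PySem.Dict.contains, List.find?, cn_beq_key, h0, h1,
        Ne.symm h0, Ne.symm h1]

theorem cnTable_a (st : Int) : cnTable.getD (st, "a") (-1) = if st = 1 ∨ st = 2 then 2 else -1 := by
  rcases eq_or_ne st 1 with h1 | h1
  · subst h1; rfl
  · rcases eq_or_ne st 2 with h2 | h2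
    · subst h2; rfl
    · simp [cnTable, PySem.Dict.ofList, PySem.Dict.getD, PySem.Dict.get?, PySem.Dict.update,
        PySem.Dict.insert, PySem.Dict.empty, PySem.Dict.contains, List.find?, cn_beq_key, h1, h2,
        Ne.symm h1, Ne.symm h2]

theorem cnTable_o (st : Int) : cnTable.getD (st, "o") (-1) = if st = 1 then 2 else -1 := by
  rcases eq_or_ne st 1 with h1 | h1
  · subst h1; rfl
  · simp [cnTable, PySem.Dict.ofList, PySem.Dict.getD, PySem.Dict.get?, PySem.Dict.update,
      PySem.Dict.insert, PySem.Dict.empty, PySem.Dict.contains, List.find?, cn_beq_key, h1,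
      Ne.symm h1]


-- character-class disjointness (ASCII/Unicode ranges in PySem.Chars)
theorem cn_dig_not_space (c : Char) : PySem.Chars.isdigit c = true → PySem.Chars.isspace c = false := by
  have h0 : '0'.val.toNat = 48 := rfl
  have h9 : '9'.val.toNat = 57 := rfl
  simp only [PySem.Chars.isdigit, PySem.Chars.isspace, Char.le_def, Char.toNat,
    UInt32.le_iff_toNat_le, h0, h9]
  simp only [Bool.and_eq_true, decide_eq_true_eq, Bool.or_eq_false_iff, Bool.and_eq_false_iff,
    decide_eq_false_iff_not]
  omega

theorem cn_dig_not_alpha (c : Char) : PySem.Chars.isdigit c = true → PySem.Chars.isalpha c = false := by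
  have h0 : '0'.val.toNat = 48 := rfl
  have h9 : '9'.val.toNat = 57 := rfl
  have ha : 'a'.val.toNat = 97 := rfl
  have hz : 'z'.val.toNat = 122 := rfl
  have hA : 'A'.val.toNat = 65 := rfl
  have hZ : 'Z'.val.toNat = 90 := rfl
  simp only [PySem.Chars.isdigit, PySem.Chars.isalpha, PySem.Chars.isupper, PySem.Chars.islower,
    Char.le_def, UInt32.le_iff_toNat_le, h0, h9, ha, hz, hA, hZ]
  simp only [Bool.or_eq_false_iff, Bool.and_eq_true, Bool.and_eq_false_iff, decide_eq_true_eq,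
    decide_eq_false_iff_not]
  omega

theorem cn_alpha_not_space (c : Char) : PySem.Chars.isalpha c = true → PySem.Chars.isspace c = false := by
  have ha : 'a'.val.toNat = 97 := rfl
  have hz : 'z'.val.toNat = 122 := rfl
  have hA : 'A'.val.toNat = 65 := rfl
  have hZ : 'Z'.val.toNat = 90 := rfl
  simp only [PySem.Chars.isalpha, PySem.Chars.isupper, PySem.Chars.islower, PySem.Chars.isspace,
    Char.le_def, Char.toNat, UInt32.le_iff_toNat_le, ha, hz, hA, hZ]
  simp only [Bool.or_eq_true, Bool.or_eq_false_iff, Bool.and_eq_true, Bool.and_eq_false_iff,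
    decide_eq_true_eq, decide_eq_false_iff_not]
  omega

theorem cnSpaceLoop_eq_any (cs : List Char) :
    cnSpaceLoop cs = cs.any (fun c => PySem.Chars.isspace c) := by
  induction cs with
  | nil => rfl
  | cons c cs ih =>
    simp only [cnSpaceLoop, List.any_cons, ← ih]
    by_cases h : PySem.Chars.isspace c = true <;> simp [h]

-- "s" never appears as the class of a table key: a whitespace char kills the DFA from any state
theorem cnRun_of_space (cs : List Char) (st : Int)
    (h : cs.any (fun c => PySem.Chars.isspace c) = true) : cnRun cs st = false := by
  induction cs generalizing st with
  | nil => simp at h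
  | cons c cs ih =>
    by_cases hc : PySem.Chars.isspace c = true
    · by_cases hd : PySem.Chars.isdigit c = true
      · exact absurd (cn_dig_not_space c hd) (by simp [hc])
      · by_cases ha : PySem.Chars.isalpha c = true
        · exact absurd (cn_alpha_not_space c ha) (by simp [hc])
        · simp [cnRun, cnCls, hd, ha, hc, cnTable_s, cnTable_d, cnTable_a, cnTable_o]
    · have h' : cs.any (fun c => PySem.Chars.isspace c) = true := by
        simpa [hc] using h
      simp only [cnRun]
      split
      · rfl
      · exact ih _ h'

-- state 2: the rest must be alphabetic
theorem cnRun_two (cs : List Char) :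
    cnRun cs 2 = cs.all (fun c => PySem.Chars.isalpha c) := by
  induction cs with
  | nil => rfl
  | cons c cs ih =>
    by_cases hd : PySem.Chars.isdigit c = true
    · have ha := cn_dig_not_alpha c hd
      simp [cnRun, cnCls, hd, ha, cnTable_s, cnTable_d, cnTable_a, cnTable_o]
    · by_cases ha : PySem.Chars.isalpha c = true
      · simp [cnRun, cnCls, hd, ha, cnTable_s, cnTable_d, cnTable_a, cnTable_o, ih]
      · by_cases hs : PySem.Chars.isspace c = true <;>
          simp [cnRun, cnCls, hd, ha, hs, cnTable_s, cnTable_d, cnTable_a, cnTable_o]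

-- state 1 of the DFA runs exactly A's onlyDigit loop (on space-free input)
theorem cnRun_one (cs : List Char)
    (h : cs.any (fun c => PySem.Chars.isspace c) = false) :
    cnRun cs 1 = cnCheckLoop cs true := by
  induction cs with
  | nil => rfl
  | cons c cs ih =>
    have h' : cs.any (fun c => PySem.Chars.isspace c) = false := by
      rcases (by simpa using h : _ ∧ _) with ⟨_, h2⟩
      simpa using h2
    by_cases hd : PySem.Chars.isdigit c = true
    · simp [cnRun, cnCls, hd, cnTable_s, cnTable_d, cnTable_a, cnTable_o,
        cnCheckLoop, ih h']
    · have hs : PySem.Chars.isspace c = false := by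
        rcases (by simpa using h : _ ∧ _) with ⟨h1, _⟩
        simpa using h1
      have htail : cnCheckLoop cs false = cs.all (fun c => PySem.Chars.isalpha c) := by
        clear h h' ih
        induction cs with
        | nil => rfl
        | cons b bs ihb =>
          by_cases hb : PySem.Chars.isalpha b = true <;> simp [cnCheckLoop, hb, ihb]
      by_cases ha : PySem.Chars.isalpha c = true <;>
        simp [cnRun, cnCls, hd, ha, hs, cnTable_s, cnTable_d, cnTable_a, cnTable_o, cnRun_two, cnCheckLoop, htail]

theorem cnCheckLoop_all_digit (cs : List Char)
    (h : cs.all (fun c => PySem.Chars.isdigit c) = true) : cnCheckLoop cs true = true := by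
  induction cs with
  | nil => rfl
  | cons c cs ih =>
    rcases (by simpa using h : _ ∧ _) with ⟨h1, h2⟩
    simp [cnCheckLoop, h1, ih (by simpa using h2)]

theorem cn_eq (string : String) : compoundName string = compoundName_alt string := by
  unfold compoundName compoundName_alt
  by_cases h0 : (string == "") = true
  · simp [h0]
  · simp only [h0, if_false, Bool.false_eq_true]
    generalize PySem.Chars.strip (PySem.Chars.lower string.toList) = s
    rw [cnSpaceLoop_eq_any]
    by_cases hsp : s.any (fun c => PySem.Chars.isspace c) = true
    · simp [hsp, cnRun_of_space s 0 hsp]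
    · have hspf : s.any (fun c => PySem.Chars.isspace c) = false := by simpa using hsp
      have hsp' : ∀ x ∈ s, PySem.Chars.isspace x = false := by
        intro x hx
        have := List.any_eq_false.mp hspf x hx
        simpa using this
      simp only [hspf, if_false, Bool.false_eq_true]
      by_cases hd : PySem.Chars.strIsdigit s = true
      · -- all digits: the DFA goes 0 →(digit) 1 and stays in the accepting state 1
        have hne : s ≠ [] := by
          intro h; rw [h] at hd; simp [PySem.Chars.strIsdigit] at hd
        have hall : ∀ x ∈ s, PySem.Chars.isdigit x = true := by
          cases s with
          | nil => intro x hx; simp at hx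
          | cons c cs =>
            have := hd
            simp only [PySem.Chars.strIsdigit, List.isEmpty_cons, Bool.not_false,
              Bool.true_and, List.all_eq_true] at this
            exact this
        cases s with
        | nil => exact absurd rfl hne
        | cons c cs =>
          have hc : PySem.Chars.isdigit c = true := hall c List.mem_cons_self
          have hcs' : cs.all (fun c => PySem.Chars.isdigit c) = true :=
            List.all_eq_true.mpr (fun x hx => hall x (List.mem_cons_of_mem _ hx))
          have hspcs : cs.any (fun c => PySem.Chars.isspace c) = false :=
            List.any_eq_false.mpr (fun x hx => by
              simp [hsp' x (List.mem_cons_of_mem _ hx)])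
          rw [show cnRun (c :: cs) 0 = cnRun cs 1 by simp [cnRun, cnCls, hc, cnTable_d]]
          rw [cnRun_one cs hspcs, cnCheckLoop_all_digit cs hcs']
          simp [hd]
      · have hdf : PySem.Chars.strIsdigit s = false := by simpa using hd
        simp only [hdf, if_false, Bool.false_eq_true]
        cases s with
        | nil => simp [cnRun]
        | cons c cs =>
          have hspcs : cs.any (fun c => PySem.Chars.isspace c) = false :=
            List.any_eq_false.mpr (fun x hx => by
              simp [hsp' x (List.mem_cons_of_mem _ hx)])
          by_cases hc : PySem.Chars.isdigit c = true
          · -- leading digit but not all digits: cs ≠ []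
            cases cs with
            | nil => simp [PySem.Chars.strIsdigit, hc] at hdf
            | cons c2 cs' =>
              have hlen : 2 ≤ (c :: c2 :: cs').length := by
                simp [List.length_cons]
              rw [show cnRun (c :: c2 :: cs') 0 = cnRun (c2 :: cs') 1 by
                simp [cnRun, cnCls, hc, cnTable_d]]
              rw [cnRun_one _ hspcs]
              simp [hlen, hc, cnCheckLoop]
          · have hcf : PySem.Chars.isdigit c = false := by simpa using hc
            have hcsp : PySem.Chars.isspace c = false := hsp' c List.mem_cons_self
            by_cases ha : PySem.Chars.isalpha c = true
            · by_cases hlen : 2 ≤ (c :: cs).length <;>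
                simp [hlen, hcf, ha, cnRun, cnCls, cnTable_a]
            · have haf : PySem.Chars.isalpha c = false := by simpa using ha
              by_cases hlen : 2 ≤ (c :: cs).length <;>
                simp [hlen, hcf, haf, hcsp, cnRun, cnCls, cnTable_o]

-- ===== VERDICT (by name: the statement is the Claim_ definition above) =====
theorem compoundName_spec : Claim_equal_compoundName := by
  intro string _
  unfold Spec_compoundName
  exact cn_eq string
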